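-- pv_equiv track=rewrite | github.com/f-p-pereira/Desafio-ITClinical | src/nth_upper.py | nth_upper
-- ===== SOURCE A (Python) =====
-- def nth_upper(text: str, n: int) -> str:
--     """
--     Devolve todos os caracteres maiúsculos que surgem a cada N posições no texto.
--
--     A função percorre o texto da esquerda para a direita e devolve apenas
--     os caracteres que:
--       - estejam numa posição múltipla de N (contagem iniciada em 1)
--       - sejam letras maiúsculas
--
--     Args:
--         text (str): Texto de entrada.
--         n (int): Intervalo de seleção. Deve ser um número inteiro >= 1.
--
--     Returns:
--         str: Uma string contendo os caracteres maiúsculos selecionados.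
--
--     Raises:
--         ValueError: Se n for menor do que 1.
--
--     Exemplos:
--         >>> nth_upper("ITCLiNicAl", 1)
--         'ITCLNA'
--         >>> nth_upper("ITCLiNicAl", 2)
--         'TLN'
--         >>> nth_upper("ITCLiNicAl", 3)
--         'CNA'
--     """
--
--     if n < 1:
--         raise ValueError("N tem de ser ≥ 1")
--
--     result = [
--         char
--         for index, char in enumerate(text, start=1)
--         if index % n == 0 and char.isupper()
--     ]
--
--     return "".join(result)
-- ===== SOURCE B (Python) =====
-- def nth_upper(text: str, n: int) -> str:
--     if n < 1:
--         raise ValueError("N tem de ser ≥ 1")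
--     out = []
--     i = n - 1
--     L = len(text)
--     while i < L:
--         c = text[i]
--         if c.isupper():
--             out.append(c)
--         i += n
--     return "".join(out)
-- ===== Notes on version B (the rewrite author's own statement) =====
-- stated objective: faster
-- what changed: B replaces A's comprehension that enumerates every character and tests index % n == 0 by an explicit index while-loop with an accumulator that jumps directly from position n-1 in steps of n, visiting only every n-th character.
import Mathlib
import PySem

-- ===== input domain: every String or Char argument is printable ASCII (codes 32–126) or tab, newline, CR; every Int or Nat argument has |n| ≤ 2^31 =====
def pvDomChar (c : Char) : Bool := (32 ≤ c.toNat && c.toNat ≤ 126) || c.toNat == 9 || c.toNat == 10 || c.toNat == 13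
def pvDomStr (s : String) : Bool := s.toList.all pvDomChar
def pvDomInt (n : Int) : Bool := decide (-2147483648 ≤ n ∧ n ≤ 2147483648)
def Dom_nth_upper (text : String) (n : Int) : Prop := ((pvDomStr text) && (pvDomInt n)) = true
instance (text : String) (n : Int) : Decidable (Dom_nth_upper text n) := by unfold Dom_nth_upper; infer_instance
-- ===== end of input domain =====

-- B replaces A's full enumerate + index % n comprehension by an explicit index
-- while-loop with an accumulator, jumping from position n-1 in steps of n; a timing run measured B faster.

-- ===== PORT A =====
-- A raises ValueError when n < 1; Pre_nth_upper excludes those inputs ("" is a dummy value there).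
def nth_upper (text : String) (n : Int) : String :=
  if n < 1 then ""
  else
    String.ofList
      (((PySem.List.enumerate text.toList 1).filter
          (fun ic => PySem.Int.mod ic.1 n == 0 && PySem.Chars.isupper ic.2)).map Prod.snd)

-- ===== PORT B =====
-- the while loop: i steps by n from n-1 while i < len(text), out accumulates the upper chars;
-- the positivity proof hn only justifies termination (the Python loop runs only with n ≥ 1).
def nth_upper_go (cs : List Char) (n : Nat) (hn : 0 < n) (i : Nat) (acc : List Char) : List Char :=
  if h : i < cs.length then
    nth_upper_go cs n hn (i + n)
      (if PySem.Chars.isupper cs[i] then acc ++ [cs[i]] else acc)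
  else acc
termination_by cs.length - i
decreasing_by omega

def nth_upper_alt (text : String) (n : Int) : String :=
  if h : n < 1 then ""
  else String.ofList (nth_upper_go text.toList n.toNat (by omega) (n.toNat - 1) [])

-- ===== PRECONDITION & SPEC =====
-- Python A raises ValueError exactly when n < 1; Pre_ admits everything else.
def Pre_nth_upper (text : String) (n : Int) : Prop := 1 ≤ n
instance (text : String) (n : Int) : Decidable (Pre_nth_upper text n) := by unfold Pre_nth_upper; infer_instance
def pvWitness_nth_upper : String × Int := ("ITCLiNicAl", 2)
def Spec_nth_upper (text : String) (n : Int) (out : String) : Prop := out = nth_upper_alt text n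
instance (text : String) (n : Int) (out : String) : Decidable (Spec_nth_upper text n out) := by unfold Spec_nth_upper; infer_instance

-- ===== CLAIM (what is proved, stated in full; the proofs are below) =====
def Claim_equal_nth_upper : Prop := ∀ (text : String) (n : Int), Dom_nth_upper text n → Pre_nth_upper text n → Spec_nth_upper text n (nth_upper text n)

-- ===== LEMMAS AND PROOFS =====

-- every n-th element of cs (1-indexed positions n, 2n, 3n, …): the common value of both ports
def pvPick (m : Nat) (cs : List Char) : List Char :=
  match h : cs.drop (m - 1) with
  | [] => []
  | c :: rest => c :: pvPick m rest
termination_by cs.length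
decreasing_by
  have := congrArg List.length h
  simp [List.length_drop] at this
  omega

lemma pvPick_nil (m : Nat) (cs : List Char) (h : cs.drop (m - 1) = []) : pvPick m cs = [] := by
  rw [pvPick, h]

lemma pvPick_cons (m : Nat) (cs : List Char) (c : Char) (rest : List Char)
    (h : cs.drop (m - 1) = c :: rest) : pvPick m cs = c :: pvPick m rest := by
  rw [pvPick, h]

-- no index in a block of < n consecutive positions starting at c*n+1 is a multiple of n
lemma pvFilterNil (n : Int) (hn : 1 ≤ n) (c : Int) (t : List Char)
    (hlen : (t.length : Int) ≤ n - 1) :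
    (PySem.List.enumerate t (c * n + 1)).filter
      (fun ic => PySem.Int.mod ic.1 n == 0) = [] := by
  rw [List.filter_eq_nil_iff]
  intro p hp
  rw [PySem.List.mem_enumerate_iff] at hp
  obtain ⟨k, hk, rfl⟩ := hp
  simp only [beq_iff_eq]
  rw [PySem.Int.mod_eq_emod_of_pos (by omega)]
  have h1 : c * n + 1 + (k : Int) = (1 + k) + n * c := by ring
  rw [h1, Int.add_mul_emod_self_left]
  have hk' : (k : Int) < n - 1 := by exact_mod_cast lt_of_lt_of_le (by exact_mod_cast hk) hlen
  rw [Int.emod_eq_of_lt (by omega) (by omega)]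
  omega

lemma pvKeyA (n : Int) (hn : 1 ≤ n) :
    ∀ (N : Nat) (cs : List Char) (c : Int), cs.length = N → 0 ≤ c →
      ((PySem.List.enumerate cs (c * n + 1)).filter
          (fun ic => PySem.Int.mod ic.1 n == 0)).map Prod.snd = pvPick n.toNat cs := by
  intro N
  induction N using Nat.strong_induction_on with
  | _ N ih =>
    intro cs c hN hc
    have hmn : ((n.toNat : Int)) = n := Int.toNat_of_nonneg (by omega)
    rcases hrest : cs.drop (n.toNat - 1) with _ | ⟨ch, rest⟩
    · rw [pvPick_nil _ _ hrest]
      have hlen : cs.length ≤ n.toNat - 1 := by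
        have := congrArg List.length hrest
        simp [List.length_drop] at this
        omega
      rw [pvFilterNil n hn c cs (by omega)]
      simp
    · rw [pvPick_cons _ _ _ _ hrest]
      have hlen : n.toNat ≤ cs.length := by
        have := congrArg List.length hrest
        simp [List.length_drop] at this
        omega
      have hsplit : cs = cs.take (n.toNat - 1) ++ ch :: rest := by
        conv_lhs => rw [← List.take_append_drop (n.toNat - 1) cs, hrest]
      have htlen : (cs.take (n.toNat - 1)).length = n.toNat - 1 := by
        simp [List.length_take]; omega
      conv_lhs => rw [hsplit]
      rw [PySem.List.enumerate_append, List.filter_append, List.map_append]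
      rw [pvFilterNil n hn c _ (by rw [htlen]; omega)]
      rw [PySem.List.enumerate_cons]
      have hidx : c * n + 1 + ((cs.take (n.toNat - 1)).length : Int) = c * n + n := by
        rw [htlen]; omega
      rw [hidx]
      have hkeep : (PySem.Int.mod (c * n + n) n == 0) = true := by
        rw [PySem.Int.mod_eq_emod_of_pos (by omega)]
        simp only [beq_iff_eq]
        have : c * n + n = 0 + n * (c + 1) := by ring
        rw [this, Int.add_mul_emod_self_left]
        simp
      have hrlen : rest.length < N := by
        have := congrArg List.length hrest
        simp [List.length_drop] at this
        omega
      have hnext : c * n + n + 1 = (c + 1) * n + 1 := by ring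
      simp only [List.filter_cons, hkeep, if_true, List.map_cons, List.map_nil, List.nil_append]
      rw [hnext, ih rest.length hrlen rest (c + 1) rfl (by omega)]

-- B's loop from index j + (n-1) computes acc ++ the upper-filtered n-th picks of cs.drop j
lemma pvKeyB (n : Nat) (hn : 0 < n) :
    ∀ (N : Nat) (cs : List Char) (j : Nat) (acc : List Char), cs.length - j = N →
      nth_upper_go cs n hn (j + (n - 1)) acc
        = acc ++ (pvPick n (cs.drop j)).filter (fun c => PySem.Chars.isupper c) := by
  intro N
  induction N using Nat.strong_induction_on with
  | _ N ih =>
    intro cs j acc hN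
    rcases hrest : (cs.drop j).drop (n - 1) with _ | ⟨ch, rest⟩
    · rw [pvPick_nil _ _ hrest]
      rw [List.drop_drop] at hrest
      have hlen : cs.length ≤ j + (n - 1) := by
        have := congrArg List.length hrest
        simp [List.length_drop] at this
        omega
      rw [nth_upper_go, dif_neg (show ¬ (j + (n - 1) < cs.length) by omega)]
      simp
    · rw [pvPick_cons _ _ _ _ hrest]
      rw [List.drop_drop] at hrest
      have h0 : (cs.drop (j + (n - 1)))[0]? = some ch := by rw [hrest]; rfl
      rw [List.getElem?_drop] at h0
      obtain ⟨hl, hv⟩ := List.getElem?_eq_some_iff.mp (by simpa using h0)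
      have hlt : j + (n - 1) < cs.length := by omega
      have hch : cs[j + (n - 1)]'(by omega) = ch := by
        rw [← hv]
      have hrested : rest = cs.drop (j + n) := by
        have hdd : cs.drop (j + n) = (cs.drop (j + (n - 1))).drop 1 := by
          rw [List.drop_drop]; congr 1; omega
        rw [hdd, hrest]; rfl
      rw [nth_upper_go, dif_pos (by omega)]
      have hstep : j + (n - 1) + n = (j + n) + (n - 1) := by omega
      have hrlen : cs.length - (j + n) < N := by omega
      rw [hstep, ih (cs.length - (j + n)) hrlen cs (j + n) _ rfl]
      rw [hch, ← hrested, List.filter_cons]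
      by_cases hu : PySem.Chars.isupper ch
      · simp [hu]
      · simp [hu]

theorem pvMain (text : String) (n : Int) (hn : 1 ≤ n) :
    nth_upper text n = nth_upper_alt text n := by
  unfold nth_upper nth_upper_alt
  rw [if_neg (by omega), dif_neg (by omega)]
  congr 1
  have hA : ((PySem.List.enumerate text.toList 1).filter
      (fun ic => PySem.Int.mod ic.1 n == 0 && PySem.Chars.isupper ic.2)).map Prod.snd
      = (pvPick n.toNat text.toList).filter (fun c => PySem.Chars.isupper c) := by
    have hcomm : (fun ic : Int × Char => PySem.Int.mod ic.1 n == 0 && PySem.Chars.isupper ic.2)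
        = fun ic : Int × Char =>
            ((fun c => PySem.Chars.isupper c) ∘ Prod.snd) ic && (PySem.Int.mod ic.1 n == 0) := by
      funext ic
      exact Bool.and_comm _ _
    rw [hcomm, ← List.filter_filter, ← List.filter_map]
    have h1 : (1 : Int) = 0 * n + 1 := by ring
    rw [h1, pvKeyA n hn text.toList.length text.toList 0 rfl le_rfl]
  rw [hA]
  have hB := pvKeyB n.toNat (by omega) text.toList.length text.toList 0 [] (by omega)
  simpa using hB.symm

-- ===== VERDICT (by name: the statement is the Claim_ definition above) =====
theorem nth_upper_spec : Claim_equal_nth_upper := by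
  intro text n _ hpre
  unfold Spec_nth_upper
  exact pvMain text n hpre
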